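-- pv_equiv track=rewrite | github.com/ognjhunt/BlueprintPipeline | replicator-job/generate_replicator_bundle.py | detect_environment_type
-- ===== SOURCE A (Python) =====
-- from enum import Enum
--
-- class EnvironmentType(str, Enum):
--     KITCHEN = "kitchen"
--     GROCERY = "grocery"
--     WAREHOUSE = "warehouse"
--     LOADING_DOCK = "loading_dock"
--     LAB = "lab"
--     OFFICE = "office"
--     UTILITY_ROOM = "utility_room"
--     HOME_LAUNDRY = "home_laundry"
--     BEDROOM = "bedroom"
--     LIVING_ROOM = "living_room"
--     BATHROOM = "bathroom"
--     GENERIC = "generic"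
--
-- SCENE_TYPE_TO_ENVIRONMENT = {
--     "kitchen": EnvironmentType.KITCHEN,
--     "grocery": EnvironmentType.GROCERY,
--     "warehouse": EnvironmentType.WAREHOUSE,
--     "loading_dock": EnvironmentType.LOADING_DOCK,
--     "lab": EnvironmentType.LAB,
--     "office": EnvironmentType.OFFICE,
--     "utility_room": EnvironmentType.UTILITY_ROOM,
--     "laundry": EnvironmentType.HOME_LAUNDRY,
--     "laundry_room": EnvironmentType.HOME_LAUNDRY,
--     "bedroom": EnvironmentType.BEDROOM,
--     "living_room": EnvironmentType.LIVING_ROOM,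
--     "bathroom": EnvironmentType.BATHROOM,
-- }
--
-- def detect_environment_type(scene_type: str, inventory: dict) -> EnvironmentType:
--     """Detect environment type from scene data."""
--     # First check direct mapping
--     scene_type_lower = scene_type.lower().strip()
--     if scene_type_lower in SCENE_TYPE_TO_ENVIRONMENT:
--         return SCENE_TYPE_TO_ENVIRONMENT[scene_type_lower]
--
--     # Try to infer from objects
--     objects = inventory.get("objects", [])
--     object_categories = set()
--     object_ids = set()
--
--     for obj in objects:
--         category = obj.get("category", "").lower()
--         obj_id = obj.get("id", "").lower()
--         object_categories.add(category)
--         object_ids.add(obj_id)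
--
--     # Inference rules
--     if any("refrigerator" in oid or "oven" in oid or "dishwasher" in oid for oid in object_ids):
--         return EnvironmentType.KITCHEN
--     if any("washer" in oid or "dryer" in oid or "hamper" in oid for oid in object_ids):
--         return EnvironmentType.HOME_LAUNDRY
--     if any("pallet" in oid or "racking" in oid or "forklift" in oid for oid in object_ids):
--         return EnvironmentType.WAREHOUSE
--     if any("shelf" in oid and "grocery" in scene_type_lower for oid in object_ids):
--         return EnvironmentType.GROCERY
--     if any("bed" in oid or "dresser" in oid or "nightstand" in oid for oid in object_ids):
--         return EnvironmentType.BEDROOM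
--     if any("lab" in oid or "bench" in oid or "microscope" in oid for oid in object_ids):
--         return EnvironmentType.LAB
--
--     return EnvironmentType.GENERIC
-- ===== SOURCE B (Python) =====
-- # Different algorithm: instead of priority-ordered any() scans, assign each
-- # keyword a numeric priority, compute in one pass the MINIMUM priority that
-- # fires over all object ids, and index the environment table by that minimum.
--
-- SCENE_TYPE_MAP = {
--     "kitchen": "kitchen",
--     "grocery": "grocery",
--     "warehouse": "warehouse",
--     "loading_dock": "loading_dock",
--     "lab": "lab",
--     "office": "office",
--     "utility_room": "utility_room",
--     "laundry": "home_laundry",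
--     "laundry_room": "home_laundry",
--     "bedroom": "bedroom",
--     "living_room": "living_room",
--     "bathroom": "bathroom",
-- }
--
-- ENVIRONMENTS = ["kitchen", "home_laundry", "warehouse", "grocery", "bedroom", "lab", "generic"]
--
-- KEYWORD_PRIORITY = {
--     "refrigerator": 0, "oven": 0, "dishwasher": 0,
--     "washer": 1, "dryer": 1, "hamper": 1,
--     "pallet": 2, "racking": 2, "forklift": 2,
--     "shelf": 3,
--     "bed": 4, "dresser": 4, "nightstand": 4,
--     "lab": 5, "bench": 5, "microscope": 5,
-- }
--
-- def detect_environment_type(scene_type: str, inventory: dict) -> str: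
--     scene_type_lower = scene_type.lower().strip()
--     if scene_type_lower in SCENE_TYPE_MAP:
--         return SCENE_TYPE_MAP[scene_type_lower]
--
--     grocery_ok = "grocery" in scene_type_lower
--     best = 6  # sentinel: index of "generic"
--     for obj in inventory.get("objects", []):
--         oid = obj.get("id", "").lower()
--         for kw, p in KEYWORD_PRIORITY.items():
--             if p < best and kw in oid and (p != 3 or grocery_ok):
--                 best = p
--     return ENVIRONMENTS[best]
-- ===== Notes on version B (the rewrite author's own statement) =====
-- stated objective: alternative
-- what changed: Replaces the chain of six priority-ordered any() scans by a numeric keyword-to-priority table: one pass computes the minimum firing priority over all object ids and the result is the environment table indexed by that minimum.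
import Mathlib
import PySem

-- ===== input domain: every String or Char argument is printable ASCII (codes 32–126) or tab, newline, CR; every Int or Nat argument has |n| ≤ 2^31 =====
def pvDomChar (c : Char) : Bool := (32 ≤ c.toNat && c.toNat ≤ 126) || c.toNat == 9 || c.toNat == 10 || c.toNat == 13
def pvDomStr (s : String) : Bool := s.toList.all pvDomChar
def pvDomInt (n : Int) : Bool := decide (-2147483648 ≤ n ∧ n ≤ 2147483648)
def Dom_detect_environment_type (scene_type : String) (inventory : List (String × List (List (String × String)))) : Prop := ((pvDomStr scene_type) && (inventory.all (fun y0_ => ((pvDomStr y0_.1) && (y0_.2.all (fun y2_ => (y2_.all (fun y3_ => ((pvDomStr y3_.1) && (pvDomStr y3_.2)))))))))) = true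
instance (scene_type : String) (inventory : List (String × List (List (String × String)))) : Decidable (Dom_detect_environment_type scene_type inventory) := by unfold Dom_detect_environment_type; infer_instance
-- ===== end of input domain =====

-- B replaces A's chain of six priority-ordered any() scans by a keyword-to-priority table:
-- one pass computes the minimum firing priority over all object ids, and the environment
-- table is indexed by that minimum (alternative algorithm, same cost).

-- ===== PORT A =====
def sceneMapA : PySem.Dict String String := PySem.Dict.mk
  [("kitchen", "kitchen"), ("grocery", "grocery"), ("warehouse", "warehouse"),
   ("loading_dock", "loading_dock"), ("lab", "lab"), ("office", "office"),
   ("utility_room", "utility_room"), ("laundry", "home_laundry"), ("laundry_room", "home_laundry"),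
   ("bedroom", "bedroom"), ("living_room", "living_room"), ("bathroom", "bathroom")]

def detect_environment_type (scene_type : String) (inventory : List (String × List (List (String × String)))) : String :=
  let scene_type_lower := PySem.Str.strip (PySem.Str.lower scene_type)
  match sceneMapA.get? scene_type_lower with
  | some v => v
  | none =>
    let objects := (PySem.Dict.mk inventory).getD "objects" []
    let sets := objects.foldl (fun (st : List String × List String) obj =>
        let category := PySem.Str.lower ((PySem.Dict.mk obj).getD "category" "")
        let obj_id := PySem.Str.lower ((PySem.Dict.mk obj).getD "id" "")
        (PySem.Set.add st.1 category, PySem.Set.add st.2 obj_id)) ([], [])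
    let object_ids := sets.2
    if object_ids.any (fun oid => PySem.Str.isIn "refrigerator" oid || PySem.Str.isIn "oven" oid || PySem.Str.isIn "dishwasher" oid) then "kitchen"
    else if object_ids.any (fun oid => PySem.Str.isIn "washer" oid || PySem.Str.isIn "dryer" oid || PySem.Str.isIn "hamper" oid) then "home_laundry"
    else if object_ids.any (fun oid => PySem.Str.isIn "pallet" oid || PySem.Str.isIn "racking" oid || PySem.Str.isIn "forklift" oid) then "warehouse"
    else if object_ids.any (fun oid => PySem.Str.isIn "shelf" oid && PySem.Str.isIn "grocery" scene_type_lower) then "grocery"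
    else if object_ids.any (fun oid => PySem.Str.isIn "bed" oid || PySem.Str.isIn "dresser" oid || PySem.Str.isIn "nightstand" oid) then "bedroom"
    else if object_ids.any (fun oid => PySem.Str.isIn "lab" oid || PySem.Str.isIn "bench" oid || PySem.Str.isIn "microscope" oid) then "lab"
    else "generic"

-- ===== PORT B =====
def sceneMapB : PySem.Dict String String := PySem.Dict.mk
  [("kitchen", "kitchen"), ("grocery", "grocery"), ("warehouse", "warehouse"),
   ("loading_dock", "loading_dock"), ("lab", "lab"), ("office", "office"),
   ("utility_room", "utility_room"), ("laundry", "home_laundry"), ("laundry_room", "home_laundry"),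
   ("bedroom", "bedroom"), ("living_room", "living_room"), ("bathroom", "bathroom")]

def bEnvs : List String := ["kitchen", "home_laundry", "warehouse", "grocery", "bedroom", "lab", "generic"]

def kwPrio : List (String × Nat) :=
  [("refrigerator", 0), ("oven", 0), ("dishwasher", 0),
   ("washer", 1), ("dryer", 1), ("hamper", 1),
   ("pallet", 2), ("racking", 2), ("forklift", 2),
   ("shelf", 3),
   ("bed", 4), ("dresser", 4), ("nightstand", 4),
   ("lab", 5), ("bench", 5), ("microscope", 5)]

def bStep (grocery_ok : Bool) (oid : String) (b : Nat) (kp : String × Nat) : Nat :=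
  if kp.2 < b && PySem.Str.isIn kp.1 oid && (kp.2 != 3 || grocery_ok) then kp.2 else b

def detect_environment_type_alt (scene_type : String) (inventory : List (String × List (List (String × String)))) : String :=
  let scene_type_lower := PySem.Str.strip (PySem.Str.lower scene_type)
  match sceneMapB.get? scene_type_lower with
  | some v => v
  | none =>
    let grocery_ok := PySem.Str.isIn "grocery" scene_type_lower
    let best := ((PySem.Dict.mk inventory).getD "objects" []).foldl
      (fun b obj => kwPrio.foldl (bStep grocery_ok (PySem.Str.lower ((PySem.Dict.mk obj).getD "id" ""))) b) 6
    bEnvs.getD best "generic"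

-- ===== PRECONDITION & SPEC =====
def Spec_detect_environment_type (scene_type : String) (inventory : List (String × List (List (String × String)))) (out : String) : Prop := out = detect_environment_type_alt scene_type inventory
instance (scene_type : String) (inventory : List (String × List (List (String × String)))) (out : String) : Decidable (Spec_detect_environment_type scene_type inventory out) := by unfold Spec_detect_environment_type; infer_instance

-- ===== CLAIM =====
def Claim_equal_detect_environment_type : Prop := ∀ (scene_type : String) (inventory : List (String × List (List (String × String)))), Dom_detect_environment_type scene_type inventory → Spec_detect_environment_type scene_type inventory (detect_environment_type scene_type inventory)

-- ===== LEMMAS AND PROOFS =====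

def lowid (obj : List (String × String)) : String :=
  PySem.Str.lower ((PySem.Dict.mk obj).getD "id" "")

-- the b-independent part of bStep's condition
def kwCond (gok : Bool) (oid : String) (kp : String × Nat) : Bool :=
  PySem.Str.isIn kp.1 oid && (kp.2 != 3 || gok)

-- the multiset of priorities that fire somewhere in the inventory
def fired (gok : Bool) (objects : List (List (String × String))) : List Nat :=
  objects.flatMap (fun obj => (kwPrio.filter (kwCond gok (lowid obj))).map Prod.snd)

lemma bStep_eq_min (gok : Bool) (oid : String) (b : Nat) (kp : String × Nat) :
    bStep gok oid b kp = if kwCond gok oid kp then min b kp.2 else b := by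
  simp only [bStep, kwCond, Bool.and_assoc]
  by_cases hb : kp.2 < b
  · simp only [hb, decide_true, Bool.true_and]
    split <;> [rw [Nat.min_eq_right (Nat.le_of_lt hb)]; rfl]
  · simp only [hb, decide_false, Bool.false_and, Bool.false_eq_true, if_false]
    split <;> [rw [Nat.min_eq_left (Nat.le_of_not_lt hb)]; rfl]

lemma foldl_bStep_eq_min (gok : Bool) (oid : String) :
    ∀ (l : List (String × Nat)) (b : Nat),
      l.foldl (bStep gok oid) b = ((l.filter (kwCond gok oid)).map Prod.snd).foldl min b := by
  intro l
  induction l with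
  | nil => intro b; rfl
  | cons a t ih =>
    intro b
    simp only [List.foldl_cons, bStep_eq_min, List.filter_cons]
    by_cases h : kwCond gok oid a
    · simp [h, ih]
    · simp [h, ih]

lemma foldl_min_eq_fired (gok : Bool) :
    ∀ (objects : List (List (String × String))) (b : Nat),
      objects.foldl (fun b obj => kwPrio.foldl (bStep gok (lowid obj)) b) b
        = (fired gok objects).foldl min b := by
  intro objects
  induction objects with
  | nil => intro b; rfl
  | cons a t ih =>
    intro b
    rw [List.foldl_cons, ih, foldl_bStep_eq_min]
    simp only [fired, List.flatMap_cons, List.foldl_append]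

lemma foldl_min_le_init : ∀ (l : List Nat) (b : Nat), l.foldl min b ≤ b := by
  intro l
  induction l with
  | nil => intro b; exact Nat.le_refl b
  | cons a t ih => intro b; exact Nat.le_trans (ih (min b a)) (Nat.min_le_left b a)

lemma foldl_min_le_mem : ∀ (l : List Nat) (b x : Nat), x ∈ l → l.foldl min b ≤ x := by
  intro l
  induction l with
  | nil => intro b x h; cases h
  | cons a t ih =>
    intro b x h
    rcases List.mem_cons.mp h with rfl | h
    · exact Nat.le_trans (foldl_min_le_init t (min b x)) (Nat.min_le_right b x)
    · exact ih (min b a) x h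

lemma le_foldl_min : ∀ (l : List Nat) (b p : Nat), p ≤ b → (∀ x ∈ l, p ≤ x) → p ≤ l.foldl min b := by
  intro l
  induction l with
  | nil => intro b p hb _; exact hb
  | cons a t ih =>
    intro b p hb hl
    exact ih (min b a) p (Nat.le_min.mpr ⟨hb, hl a (List.mem_cons_self)⟩)
      (fun x hx => hl x (List.mem_cons_of_mem a hx))

lemma mem_fired_iff (gok : Bool) (objects : List (List (String × String))) (x : Nat) :
    x ∈ fired gok objects ↔
      ∃ obj ∈ objects, ∃ kp ∈ kwPrio, kwCond gok (lowid obj) kp = true ∧ kp.2 = x := by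
  simp [fired, List.mem_flatMap, List.mem_filter, List.mem_map]

-- A's per-rule predicates
def fires (gok : Bool) (p : Nat) (oid : String) : Bool :=
  match p with
  | 0 => PySem.Str.isIn "refrigerator" oid || PySem.Str.isIn "oven" oid || PySem.Str.isIn "dishwasher" oid
  | 1 => PySem.Str.isIn "washer" oid || PySem.Str.isIn "dryer" oid || PySem.Str.isIn "hamper" oid
  | 2 => PySem.Str.isIn "pallet" oid || PySem.Str.isIn "racking" oid || PySem.Str.isIn "forklift" oid
  | 3 => PySem.Str.isIn "shelf" oid && gok
  | 4 => PySem.Str.isIn "bed" oid || PySem.Str.isIn "dresser" oid || PySem.Str.isIn "nightstand" oid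
  | 5 => PySem.Str.isIn "lab" oid || PySem.Str.isIn "bench" oid || PySem.Str.isIn "microscope" oid
  | _ => false

lemma mem_fired_iff_fires (gok : Bool) (objects : List (List (String × String))) (p : Nat)
    (hp : p ≤ 5) :
    p ∈ fired gok objects ↔ objects.any (fun o => fires gok p (lowid o)) = true := by
  rw [mem_fired_iff]
  simp only [List.any_eq_true]
  constructor
  · rintro ⟨o, ho, kp, hkp, hc, hx⟩
    refine ⟨o, ho, ?_⟩
    subst hx
    fin_cases hkp <;> simp_all [kwCond, fires]
  · rintro ⟨o, ho, h⟩
    refine ⟨o, ho, ?_⟩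
    interval_cases p <;> simp only [fires] at h
    · rcases Bool.or_eq_true_iff.mp h with h | h
      rcases Bool.or_eq_true_iff.mp h with h | h
      · exact ⟨("refrigerator", 0), by simp [kwPrio], by simp only [kwCond, h]; cases gok <;> rfl, rfl⟩
      · exact ⟨("oven", 0), by simp [kwPrio], by simp only [kwCond, h]; cases gok <;> rfl, rfl⟩
      · exact ⟨("dishwasher", 0), by simp [kwPrio], by simp only [kwCond, h]; cases gok <;> rfl, rfl⟩
    · rcases Bool.or_eq_true_iff.mp h with h | h
      rcases Bool.or_eq_true_iff.mp h with h | h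
      · exact ⟨("washer", 1), by simp [kwPrio], by simp only [kwCond, h]; cases gok <;> rfl, rfl⟩
      · exact ⟨("dryer", 1), by simp [kwPrio], by simp only [kwCond, h]; cases gok <;> rfl, rfl⟩
      · exact ⟨("hamper", 1), by simp [kwPrio], by simp only [kwCond, h]; cases gok <;> rfl, rfl⟩
    · rcases Bool.or_eq_true_iff.mp h with h | h
      rcases Bool.or_eq_true_iff.mp h with h | h
      · exact ⟨("pallet", 2), by simp [kwPrio], by simp only [kwCond, h]; cases gok <;> rfl, rfl⟩
      · exact ⟨("racking", 2), by simp [kwPrio], by simp only [kwCond, h]; cases gok <;> rfl, rfl⟩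
      · exact ⟨("forklift", 2), by simp [kwPrio], by simp only [kwCond, h]; cases gok <;> rfl, rfl⟩
    · rcases Bool.and_eq_true_iff.mp h with ⟨h1, h2⟩
      exact ⟨("shelf", 3), by simp [kwPrio], by simp only [kwCond, h1, h2]; rfl, rfl⟩
    · rcases Bool.or_eq_true_iff.mp h with h | h
      rcases Bool.or_eq_true_iff.mp h with h | h
      · exact ⟨("bed", 4), by simp [kwPrio], by simp only [kwCond, h]; cases gok <;> rfl, rfl⟩
      · exact ⟨("dresser", 4), by simp [kwPrio], by simp only [kwCond, h]; cases gok <;> rfl, rfl⟩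
      · exact ⟨("nightstand", 4), by simp [kwPrio], by simp only [kwCond, h]; cases gok <;> rfl, rfl⟩
    · rcases Bool.or_eq_true_iff.mp h with h | h
      rcases Bool.or_eq_true_iff.mp h with h | h
      · exact ⟨("lab", 5), by simp [kwPrio], by simp only [kwCond, h]; cases gok <;> rfl, rfl⟩
      · exact ⟨("bench", 5), by simp [kwPrio], by simp only [kwCond, h]; cases gok <;> rfl, rfl⟩
      · exact ⟨("microscope", 5), by simp [kwPrio], by simp only [kwCond, h]; cases gok <;> rfl, rfl⟩

lemma mem_fired_le_five (gok : Bool) (objects : List (List (String × String))) (x : Nat)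
    (hx : x ∈ fired gok objects) : x ≤ 5 := by
  rcases (mem_fired_iff gok objects x).mp hx with ⟨o, _, kp, hkp, _, hx⟩
  subst hx; fin_cases hkp <;> simp

-- A's any-over-dedup-set equals any over the raw object list
lemma ids_any_gen (objects : List (List (String × String))) (p : String → Bool)
    (s1 s2 : List String) :
    ((objects.foldl (fun (st : List String × List String) obj =>
        (PySem.Set.add st.1 (PySem.Str.lower ((PySem.Dict.mk obj).getD "category" "")),
         PySem.Set.add st.2 (lowid obj))) (s1, s2)).2).any p
      = (s2.any p || objects.any (fun o => p (lowid o))) := by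
  induction objects generalizing s1 s2 with
  | nil => simp
  | cons a t ih =>
    simp only [List.foldl_cons, List.any_cons, ih]
    have : ∀ (s : List String) (x : String), (PySem.Set.add s x).any p = (s.any p || p x) := by
      intro s x
      simp only [PySem.Set.add]
      split
      · rename_i h
        have hx : x ∈ s := (PySem.Set.contains_iff s x).mp h
        cases hpx : p x
        · simp
        · simp only [Bool.or_true]
          simp [List.any_eq_true]; exact ⟨x, hx, hpx⟩
      · simp
    rw [this]
    simp [Bool.or_assoc]

lemma ids_any (objects : List (List (String × String))) (p : String → Bool) :
    ((objects.foldl (fun (st : List String × List String) obj =>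
        (PySem.Set.add st.1 (PySem.Str.lower ((PySem.Dict.mk obj).getD "category" "")),
         PySem.Set.add st.2 (lowid obj))) ([], [])).2).any p
      = objects.any (fun o => p (lowid o)) := by
  rw [ids_any_gen]; simp

-- the minimum of the fired priorities equals the first rule (in A's order) that fires
lemma fired_min_chain (gok : Bool) (objects : List (List (String × String))) :
    (fired gok objects).foldl min 6 =
      (if objects.any (fun o => fires gok 0 (lowid o)) then 0
       else if objects.any (fun o => fires gok 1 (lowid o)) then 1
       else if objects.any (fun o => fires gok 2 (lowid o)) then 2
       else if objects.any (fun o => fires gok 3 (lowid o)) then 3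
       else if objects.any (fun o => fires gok 4 (lowid o)) then 4
       else if objects.any (fun o => fires gok 5 (lowid o)) then 5
       else 6) := by
  have hm : ∀ p : Nat, p ≤ 5 →
      (p ∈ fired gok objects ↔ objects.any (fun o => fires gok p (lowid o)) = true) :=
    fun p hp => mem_fired_iff_fires gok objects p hp
  split_ifs with h0 h1 h2 h3 h4 h5
  · exact Nat.le_zero.mp (foldl_min_le_mem _ _ _ ((hm 0 (by omega)).mpr h0))
  · refine Nat.le_antisymm (foldl_min_le_mem _ _ _ ((hm 1 (by omega)).mpr h1)) ?_
    refine le_foldl_min _ _ _ (by omega) (fun x hx => ?_)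
    rcases Nat.eq_zero_or_pos x with rfl | hpos
    · exact absurd ((hm 0 (by omega)).mp hx) (by simpa using h0)
    · exact hpos
  · refine Nat.le_antisymm (foldl_min_le_mem _ _ _ ((hm 2 (by omega)).mpr h2)) ?_
    refine le_foldl_min _ _ _ (by omega) (fun x hx => ?_)
    by_contra hlt
    interval_cases x
    · exact h0 ((hm 0 (by omega)).mp hx)
    · exact h1 ((hm 1 (by omega)).mp hx)
  · refine Nat.le_antisymm (foldl_min_le_mem _ _ _ ((hm 3 (by omega)).mpr h3)) ?_
    refine le_foldl_min _ _ _ (by omega) (fun x hx => ?_)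
    by_contra hlt
    interval_cases x
    · exact h0 ((hm 0 (by omega)).mp hx)
    · exact h1 ((hm 1 (by omega)).mp hx)
    · exact h2 ((hm 2 (by omega)).mp hx)
  · refine Nat.le_antisymm (foldl_min_le_mem _ _ _ ((hm 4 (by omega)).mpr h4)) ?_
    refine le_foldl_min _ _ _ (by omega) (fun x hx => ?_)
    by_contra hlt
    interval_cases x
    · exact h0 ((hm 0 (by omega)).mp hx)
    · exact h1 ((hm 1 (by omega)).mp hx)
    · exact h2 ((hm 2 (by omega)).mp hx)
    · exact h3 ((hm 3 (by omega)).mp hx)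
  · refine Nat.le_antisymm (foldl_min_le_mem _ _ _ ((hm 5 (by omega)).mpr h5)) ?_
    refine le_foldl_min _ _ _ (by omega) (fun x hx => ?_)
    by_contra hlt
    interval_cases x
    · exact h0 ((hm 0 (by omega)).mp hx)
    · exact h1 ((hm 1 (by omega)).mp hx)
    · exact h2 ((hm 2 (by omega)).mp hx)
    · exact h3 ((hm 3 (by omega)).mp hx)
    · exact h4 ((hm 4 (by omega)).mp hx)
  · refine Nat.le_antisymm (foldl_min_le_init _ _) ?_
    refine le_foldl_min _ _ _ (by omega) (fun x hx => ?_)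
    by_contra hlt
    have hx5 := mem_fired_le_five gok objects x hx
    interval_cases x
    · exact h0 ((hm 0 (by omega)).mp hx)
    · exact h1 ((hm 1 (by omega)).mp hx)
    · exact h2 ((hm 2 (by omega)).mp hx)
    · exact h3 ((hm 3 (by omega)).mp hx)
    · exact h4 ((hm 4 (by omega)).mp hx)
    · exact h5 ((hm 5 (by omega)).mp hx)

-- ===== VERDICT =====
theorem detect_environment_type_spec : Claim_equal_detect_environment_type := by
  unfold Claim_equal_detect_environment_type
  intro scene_type inventory _
  simp only [Spec_detect_environment_type, detect_environment_type, detect_environment_type_alt]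
  have hmap : sceneMapA = sceneMapB := rfl
  rw [hmap]
  cases h : sceneMapB.get? (PySem.Str.strip (PySem.Str.lower scene_type)) with
  | some v => rfl
  | none =>
    generalize (PySem.Dict.mk inventory).getD "objects" [] = objects
    generalize hg : PySem.Str.isIn "grocery" (PySem.Str.strip (PySem.Str.lower scene_type)) = gok
    have hlow : ∀ obj : List (String × String),
        PySem.Str.lower ((PySem.Dict.mk obj).getD "id" "") = lowid obj := fun _ => rfl
    simp only [hlow]
    rw [foldl_min_eq_fired, fired_min_chain]
    rw [ids_any, ids_any, ids_any, ids_any, ids_any, ids_any]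
    simp only [fires]
    split_ifs <;> rfl
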